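-- pv_equiv track=rewrite | github.com/00mjk/largest_island | solution.py | solRec
-- ===== SOURCE A (Python) =====
-- def solRec(arr2D):
--     def sizeOfIsland(arr2D, i, j):
--         try:
--             if i >= 0 and j >= 0 and arr2D[i][j] == 1:
--                 arr2D[i][j] = 0
--                 return 1 + sizeOfIsland(arr2D, i+1, j+1) + sizeOfIsland(arr2D, i+1, j) + sizeOfIsland(arr2D, i+1, j-1) + sizeOfIsland(arr2D, i, j+1) + sizeOfIsland(arr2D, i, j-1) + sizeOfIsland(arr2D, i-1, j+1) + sizeOfIsland(arr2D, i-1, j) + sizeOfIsland(arr2D, i-1, j-1)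
--             return 0
--         except:
--             return 0
--
--     largestSoFar = 0
--     for i, row in enumerate(arr2D):
--         for j in range(len(row)):
--             if arr2D[i][j] == 0:
--                 continue
--             else:
--                 nextSize = sizeOfIsland(arr2D, i, j)
--                 if nextSize > largestSoFar:
--                     largestSoFar = nextSize
--     return largestSoFar
-- ===== SOURCE B (Python) =====
-- def solRec(arr2D):
--     best = 0
--     for i, row in enumerate(arr2D):
--         for j in range(len(row)):
--             if arr2D[i][j] != 1:
--                 continue
--             size = 0
--             stack = [(i, j)]
--             while stack:
--                 a, b = stack.pop()
--                 if a < 0 or b < 0 or a >= len(arr2D):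
--                     continue
--                 r = arr2D[a]
--                 if b >= len(r) or r[b] != 1:
--                     continue
--                 r[b] = 0
--                 size += 1
--                 stack.append((a - 1, b - 1))
--                 stack.append((a - 1, b))
--                 stack.append((a - 1, b + 1))
--                 stack.append((a, b - 1))
--                 stack.append((a, b + 1))
--                 stack.append((a + 1, b - 1))
--                 stack.append((a + 1, b))
--                 stack.append((a + 1, b + 1))
--             best = max(best, size)
--     return best
-- ===== Notes on version B (the rewrite author's own statement) =====
-- stated objective: idiomatic
-- what changed: Replaces A's 8-way recursive DFS (with try/except index guards) by an iterative flood fill over an explicit LIFO stack with explicit bounds checks, and the if-update of the running maximum by max().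
import Mathlib
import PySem

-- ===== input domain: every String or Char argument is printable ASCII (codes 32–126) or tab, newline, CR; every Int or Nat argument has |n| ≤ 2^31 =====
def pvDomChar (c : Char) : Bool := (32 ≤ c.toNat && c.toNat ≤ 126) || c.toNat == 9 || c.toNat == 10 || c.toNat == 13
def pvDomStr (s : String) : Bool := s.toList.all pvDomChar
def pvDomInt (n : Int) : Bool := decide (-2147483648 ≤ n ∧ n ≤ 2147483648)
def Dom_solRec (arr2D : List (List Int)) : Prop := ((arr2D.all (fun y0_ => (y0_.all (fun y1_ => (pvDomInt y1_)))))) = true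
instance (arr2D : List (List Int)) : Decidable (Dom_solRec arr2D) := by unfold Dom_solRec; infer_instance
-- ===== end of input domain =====

-- B replaces A's 8-way recursive flood fill by an iterative flood fill over an explicit stack;
-- both Pythons zero out visited cells of the argument in place (the same cells), the theorem is about the return value.

-- ===== PORT A =====

-- arr2D[i][j] inside the try (IndexError caught = none); i, j may be any Int but are guarded ≥ 0 before use
def cellGet (g : List (List Int)) (i j : Int) : Option Int :=
  (PySem.List.pyGet? g i).bind (fun row => PySem.List.pyGet? row j)

-- arr2D[i][j] = 0 (only executed on in-range nonnegative i, j)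
def zeroCell (g : List (List Int)) (i j : Int) : List (List Int) :=
  g.set i.toNat ((g.getD i.toNat []).set j.toNat 0)

-- number of cells equal to 1: used only as the fuel bound making the ports' recursions total
def ones (g : List (List Int)) : Nat :=
  (g.map (fun r => r.countP (fun x => x == 1))).sum

-- A's recursive sizeOfIsland; fuel only makes the recursion structural — fuel = ones g + 1 at the
-- top call always suffices (each nested guard-true frame consumes a distinct 1-cell), so the
-- fuel-0 branch is unreachable from solRec.
def sizeOfIsland (fuel : Nat) (g : List (List Int)) (i j : Int) : List (List Int) × Int :=
  match fuel with
  | 0 => (g, 0)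
  | fuel + 1 =>
    if 0 ≤ i ∧ 0 ≤ j ∧ cellGet g i j = some 1 then
      let g0 := zeroCell g i j
      let r1 := sizeOfIsland fuel g0 (i+1) (j+1)
      let r2 := sizeOfIsland fuel r1.1 (i+1) j
      let r3 := sizeOfIsland fuel r2.1 (i+1) (j-1)
      let r4 := sizeOfIsland fuel r3.1 i (j+1)
      let r5 := sizeOfIsland fuel r4.1 i (j-1)
      let r6 := sizeOfIsland fuel r5.1 (i-1) (j+1)
      let r7 := sizeOfIsland fuel r6.1 (i-1) j
      let r8 := sizeOfIsland fuel r7.1 (i-1) (j-1)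
      (r8.1, 1 + r1.2 + r2.2 + r3.2 + r4.2 + r5.2 + r6.2 + r7.2 + r8.2)
    else (g, 0)

-- the body of A's double loop: skip on 0, else flood-fill and keep the larger size
def innerA (st : List (List Int) × Int) (i j : Int) : List (List Int) × Int :=
  if (cellGet st.1 i j).getD 0 = 0 then st
  else
    let r := sizeOfIsland (ones st.1 + 1) st.1 i j
    (r.1, if r.2 > st.2 then r.2 else st.2)

def solRec (arr2D : List (List Int)) : Int :=
  ((PySem.List.enumerate arr2D).foldl (fun st p =>
      (PySem.List.pyRange 0 (p.2.length : Int) 1).foldl (fun st j => innerA st p.1 j) st)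
    (arr2D, (0 : Int))).2

-- ===== PORT B =====

-- these three lemmas are cited by floodB's decreasing_by (zeroing a 1-cell lowers `ones`)
theorem sum_set_nat (l : List Nat) (n : Nat) (x : Nat) (h : n < l.length) :
    (l.set n x).sum + l.getD n 0 = l.sum + x := by
  induction l generalizing n with
  | nil => simp at h
  | cons a l ih =>
    cases n with
    | zero => simp [List.set]; omega
    | succ n =>
      simp only [List.set, List.sum_cons, List.getD_cons_succ]
      have := ih n (by simpa using h)
      omega

theorem countP_set_zero (r : List Int) (m : Nat) (hm : m < r.length) (hv : r.getD m 0 = 1) :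
    (r.set m (0 : Int)).countP (fun x => x == 1) + 1 = r.countP (fun x => x == 1) := by
  induction r generalizing m with
  | nil => simp at hm
  | cons a r ih =>
    cases m with
    | zero =>
      simp only [List.getD_cons_zero] at hv
      simp [List.set, hv]
    | succ m =>
      simp only [List.getD_cons_succ] at hv
      have := ih m (by simpa using hm) hv
      simp only [List.set, List.countP_cons]
      omega

theorem ones_zeroCell_lt (g : List (List Int)) (a b : Int)
    (ha : a.toNat < g.length) (hb : b.toNat < (g.getD a.toNat []).length)
    (hv : (g.getD a.toNat []).getD b.toNat 0 = 1) :
    ones (zeroCell g a b) < ones g := by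
  unfold zeroCell ones
  rw [List.map_set]
  have h1 := countP_set_zero (g.getD a.toNat []) b.toNat hb hv
  have h2 := sum_set_nat (g.map (fun r => r.countP (fun x => x == 1))) a.toNat
      (((g.getD a.toNat []).set b.toNat 0).countP (fun x => x == 1)) (by simpa using ha)
  have hg : (g.map (fun r => r.countP (fun x => x == 1))).getD a.toNat 0
      = (g.getD a.toNat []).countP (fun x => x == 1) := by
    rw [List.getD_eq_getElem?_getD, List.getElem?_map, List.getD_eq_getElem?_getD]
    rw [List.getElem?_eq_getElem ha]
    simp
  rw [hg] at h2
  omega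

-- B's while-loop over an explicit stack (Lean list head = Python list end = top of stack);
-- the state is (grid, stack, size); terminates because each iteration pops one entry or zeroes a 1-cell.
def floodB (g : List (List Int)) (stack : List (Int × Int)) (size : Int) : List (List Int) × Int :=
  match stack with
  | [] => (g, size)
  | (a, b) :: rest =>
    if h : 0 ≤ a ∧ 0 ≤ b ∧ a < (g.length : Int) ∧ b < ((g.getD a.toNat []).length : Int)
           ∧ (g.getD a.toNat []).getD b.toNat 0 = 1 then
      floodB (zeroCell g a b)
        ([(a+1,b+1), (a+1,b), (a+1,b-1), (a,b+1), (a,b-1), (a-1,b+1), (a-1,b), (a-1,b-1)] ++ rest)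
        (size + 1)
    else floodB g rest size
  termination_by 9 * ones g + stack.length
  decreasing_by
  · have hlt : ones (zeroCell g a b) < ones g :=
      ones_zeroCell_lt g a b (by omega) (by omega) h.2.2.2.2
    simp only [List.length_append, List.length_cons, List.length_nil]
    omega
  · simp only [List.length_cons]; omega

-- the body of B's double loop: skip unless the cell is 1, else run the stack flood fill and take the max
def innerB (st : List (List Int) × Int) (i j : Int) : List (List Int) × Int :=
  if (cellGet st.1 i j).getD 0 ≠ 1 then st
  else
    let r := floodB st.1 [(i, j)] 0
    (r.1, max st.2 r.2)

def solRec_alt (arr2D : List (List Int)) : Int :=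
  ((PySem.List.enumerate arr2D).foldl (fun st p =>
      (PySem.List.pyRange 0 (p.2.length : Int) 1).foldl (fun st j => innerB st p.1 j) st)
    (arr2D, (0 : Int))).2

-- ===== PRECONDITION & SPEC =====
def Spec_solRec (arr2D : List (List Int)) (out : Int) : Prop := out = solRec_alt arr2D
instance (arr2D : List (List Int)) (out : Int) : Decidable (Spec_solRec arr2D out) := by unfold Spec_solRec; infer_instance

-- ===== CLAIM (what is proved, stated in full; the proofs are below) =====
def Claim_equal_solRec : Prop := ∀ (arr2D : List (List Int)), Dom_solRec arr2D → Spec_solRec arr2D (solRec arr2D)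

-- ===== LEMMAS AND PROOFS =====

-- A's guard (index via try/except) and B's guard (explicit bounds checks) accept the same cells
theorem guard_iff (g : List (List Int)) (a b : Int) :
    (0 ≤ a ∧ 0 ≤ b ∧ cellGet g a b = some 1) ↔
    (0 ≤ a ∧ 0 ≤ b ∧ a < (g.length : Int) ∧ b < ((g.getD a.toNat []).length : Int)
      ∧ (g.getD a.toNat []).getD b.toNat 0 = 1) := by
  constructor
  · rintro ⟨ha, hb, hc⟩
    unfold cellGet at hc
    rw [PySem.List.pyGet?_of_nonneg g ha] at hc
    cases hrow : g[a.toNat]? with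
    | none => rw [hrow] at hc; simp at hc
    | some row =>
      rw [hrow] at hc
      simp only [Option.bind_some] at hc
      rw [PySem.List.pyGet?_of_nonneg row hb] at hc
      have hal : a.toNat < g.length := by
        by_contra hcon
        rw [List.getElem?_eq_none (by omega)] at hrow; simp at hrow
      have hrg : g.getD a.toNat [] = row := by
        rw [List.getD_eq_getElem?_getD, hrow]; rfl
      have hbl : b.toNat < row.length := by
        by_contra hcon
        rw [List.getElem?_eq_none (by omega)] at hc; simp at hc
      have hv : row.getD b.toNat 0 = 1 := by
        rw [List.getD_eq_getElem?_getD, hc]; rfl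
      refine ⟨ha, hb, by omega, ?_, ?_⟩ <;> rw [hrg]
      · omega
      · exact hv
  · rintro ⟨ha, hb, hal, hbl, hv⟩
    refine ⟨ha, hb, ?_⟩
    unfold cellGet
    rw [PySem.List.pyGet?_of_nonneg g ha]
    have hal' : a.toNat < g.length := by omega
    rw [List.getElem?_eq_getElem hal']
    simp only [Option.bind_some]
    rw [PySem.List.pyGet?_of_nonneg _ hb]
    have hrg : g.getD a.toNat [] = g[a.toNat] := List.getD_eq_getElem _ _ hal'
    rw [hrg] at hbl hv
    have hbl' : b.toNat < g[a.toNat].length := by omega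
    rw [List.getElem?_eq_getElem hbl']
    rw [List.getD_eq_getElem _ _ hbl'] at hv
    rw [hv]

theorem ones_sizeOfIsland_le (fuel : Nat) : ∀ (g : List (List Int)) (i j : Int),
    ones (sizeOfIsland fuel g i j).1 ≤ ones g := by
  induction fuel with
  | zero => intro g i j; simp [sizeOfIsland]
  | succ n ih =>
    intro g i j
    by_cases hG : 0 ≤ i ∧ 0 ≤ j ∧ cellGet g i j = some 1
    · have hG' := (guard_iff g i j).1 hG
      have hz : ones (zeroCell g i j) < ones g :=
        ones_zeroCell_lt g i j (by omega) (by omega) hG'.2.2.2.2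
      simp only [sizeOfIsland]
      rw [if_pos hG]
      refine le_trans ?_ hz.le
      refine le_trans (ih _ _ _) ?_
      refine le_trans (ih _ _ _) ?_
      refine le_trans (ih _ _ _) ?_
      refine le_trans (ih _ _ _) ?_
      refine le_trans (ih _ _ _) ?_
      refine le_trans (ih _ _ _) ?_
      refine le_trans (ih _ _ _) ?_
      exact ih _ _ _
    · simp only [sizeOfIsland]
      rw [if_neg hG]

-- A-side driver used only in the proofs: run A's recursive fill over a list of seed cells in order
def runSeeds (n : Nat) (g : List (List Int)) (seeds : List (Int × Int)) :
    List (List Int) × Int :=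
  match seeds with
  | [] => (g, 0)
  | s :: ss =>
    let r := sizeOfIsland n g s.1 s.2
    let q := runSeeds n r.1 ss
    (q.1, r.2 + q.2)

-- popping a whole list of seeds in order equals running A's fill on each seed in order
theorem chain_step (n : Nat)
    (ih : ∀ (g : List (List Int)) (i j : Int) (rest : List (Int × Int)) (size : Int),
      ones g < n → floodB g ((i, j) :: rest) size
        = floodB (sizeOfIsland n g i j).1 rest (size + (sizeOfIsland n g i j).2)) :
    ∀ (seeds : List (Int × Int)) (g : List (List Int)) (rest : List (Int × Int)) (size : Int),
      ones g < n →
      floodB g (seeds ++ rest) size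
        = floodB (runSeeds n g seeds).1 rest (size + (runSeeds n g seeds).2) := by
  intro seeds
  induction seeds with
  | nil => intro g rest size h; simp [runSeeds]
  | cons s ss ihs =>
    intro g rest size h
    simp only [List.cons_append]
    rw [ih g s.1 s.2 (ss ++ rest) size h]
    rw [ihs _ rest _ (lt_of_le_of_lt (ones_sizeOfIsland_le n g s.1 s.2) h)]
    simp only [runSeeds]
    congr 1
    ring

-- the stack machine processes the popped cell's whole DFS subtree before the rest of the stack
theorem flood_sim : ∀ (fuel : Nat) (g : List (List Int)) (i j : Int)
    (rest : List (Int × Int)) (size : Int), ones g < fuel →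
    floodB g ((i, j) :: rest) size
      = floodB (sizeOfIsland fuel g i j).1 rest (size + (sizeOfIsland fuel g i j).2) := by
  intro fuel
  induction fuel with
  | zero => intro g i j rest size h; exact absurd h (by omega)
  | succ n ih =>
    intro g i j rest size h
    by_cases hG : 0 ≤ i ∧ 0 ≤ j ∧ cellGet g i j = some 1
    · have hG' := (guard_iff g i j).1 hG
      have hz : ones (zeroCell g i j) < ones g :=
        ones_zeroCell_lt g i j (by omega) (by omega) hG'.2.2.2.2
      rw [floodB, dif_pos hG']
      rw [chain_step n ih _ (zeroCell g i j) rest (size + 1) (by omega)]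
      simp only [sizeOfIsland, runSeeds]
      rw [if_pos hG]
      congr 1
      ring
    · have hG' : ¬ (0 ≤ i ∧ 0 ≤ j ∧ i < (g.length : Int)
          ∧ j < ((g.getD i.toNat []).length : Int) ∧ (g.getD i.toNat []).getD j.toNat 0 = 1) :=
        fun hx => hG ((guard_iff g i j).2 hx)
      rw [floodB, dif_neg hG']
      simp only [sizeOfIsland]
      rw [if_neg hG]
      simp

theorem floodB_single (g : List (List Int)) (i j : Int) :
    floodB g [(i, j)] 0 = sizeOfIsland (ones g + 1) g i j := by
  rw [flood_sim (ones g + 1) g i j [] 0 (by omega), floodB]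
  simp

theorem inner_eq (st : List (List Int) × Int) (hL : 0 ≤ st.2) (i j : Int) :
    innerA st i j = innerB st i j ∧ 0 ≤ (innerB st i j).2 := by
  obtain ⟨g, L⟩ := st
  simp only at hL
  unfold innerA innerB
  dsimp only
  by_cases hv0 : (cellGet g i j).getD 0 = 0
  · rw [if_pos hv0, if_pos (by rw [hv0]; norm_num)]
    exact ⟨rfl, hL⟩
  · by_cases hv1 : (cellGet g i j).getD 0 = 1
    · rw [if_neg hv0, if_neg (show ¬((cellGet g i j).getD 0 ≠ 1) by simp [hv1])]
      rw [floodB_single]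
      refine ⟨?_, le_trans hL (le_max_left _ _)⟩
      have : (if (sizeOfIsland (ones g + 1) g i j).2 > L
            then (sizeOfIsland (ones g + 1) g i j).2 else L)
          = max L (sizeOfIsland (ones g + 1) g i j).2 := by
        rw [max_def]
        split_ifs <;> omega
      rw [this]
    · -- the cell holds some value other than 0 and 1: A's fill refuses it, B skips it
      have hG : ¬ (0 ≤ i ∧ 0 ≤ j ∧ cellGet g i j = some 1) := by
        rintro ⟨-, -, hc⟩
        rw [hc] at hv1
        simp at hv1
      rw [if_neg hv0, if_pos hv1]
      simp only [sizeOfIsland]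
      rw [if_neg hG]
      refine ⟨?_, hL⟩
      simp only
      rw [if_neg (by omega)]

theorem inner_fold (i : Int) : ∀ (js : List Int) (st : List (List Int) × Int), 0 ≤ st.2 →
    js.foldl (fun st j => innerA st i j) st = js.foldl (fun st j => innerB st i j) st
    ∧ 0 ≤ (js.foldl (fun st j => innerB st i j) st).2 := by
  intro js
  induction js with
  | nil => intro st h; exact ⟨rfl, h⟩
  | cons j js ih =>
    intro st h
    obtain ⟨e, h2⟩ := inner_eq st h i j
    simp only [List.foldl_cons]
    rw [e]
    exact ih _ h2

theorem outer_fold : ∀ (ps : List (Int × List Int)) (st : List (List Int) × Int), 0 ≤ st.2 →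
    ps.foldl (fun st p => (PySem.List.pyRange 0 (p.2.length : Int) 1).foldl
        (fun st j => innerA st p.1 j) st) st
      = ps.foldl (fun st p => (PySem.List.pyRange 0 (p.2.length : Int) 1).foldl
        (fun st j => innerB st p.1 j) st) st
    ∧ 0 ≤ (ps.foldl (fun st p => (PySem.List.pyRange 0 (p.2.length : Int) 1).foldl
        (fun st j => innerB st p.1 j) st) st).2 := by
  intro ps
  induction ps with
  | nil => intro st h; exact ⟨rfl, h⟩
  | cons p ps ih =>
    intro st h
    obtain ⟨e, h2⟩ := inner_fold p.1 (PySem.List.pyRange 0 (p.2.length : Int) 1) st h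
    simp only [List.foldl_cons]
    rw [e]
    exact ih _ h2

-- ===== VERDICT (by name: the statement is the Claim_ definition above) =====
theorem solRec_spec : Claim_equal_solRec := by
  intro arr2D _
  unfold Spec_solRec solRec solRec_alt
  rw [(outer_fold (PySem.List.enumerate arr2D) (arr2D, 0) (by norm_num)).1]
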